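-- pv_equiv track=rewrite | github.com/sora81dev/Contest | ARC171/d.py | solve
-- ===== SOURCE A (Python) =====
-- def solve(P, B, N, M, queries):
--     for i in range(1 << N):
--         A = [int((i >> j) & 1) for j in range(N)]
--         valid = True
--         for query in queries:
--             L, R = query
--             s = A[L-1:R]
--             hashed = sum(x * pow(B, len(s) - j - 1, P) for j, x in enumerate(s)) % P
--             if hashed == 0:
--                 valid = False
--                 break
--         if valid:
--             return "Yes"
--     return "No"
-- ===== SOURCE B (Python) =====
-- def solve(P, B, N, M, queries):
--     # Resolve each query's slice to its concrete index window via the stdlib.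
--     spans = [slice(L - 1, R).indices(N)[:2] for L, R in queries]
--
--     def fails(bits):
--         d = len(bits)
--         for a, b in spans:
--             if b == d:
--                 h = 0
--                 for j in range(a, b):
--                     h = (h * B + bits[j]) % P
--                 if h == 0:
--                     return True
--         return False
--
--     # Depth-first search over bit strings, pruning a whole subtree as soon as
--     # a fully determined window hashes to zero.
--     stack = [[]]
--     while stack:
--         bits = stack.pop()
--         if fails(bits):
--             continue
--         if len(bits) == N:
--             return "Yes"
--         stack.append(bits + [1])
--         stack.append(bits + [0])
--     return "No"
-- ===== Notes on version B (the rewrite author's own statement) =====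
-- stated objective: alternative
-- what changed: Replaces A's flat enumeration of all 2^N bit strings (each candidate rebuilt as a list and every query re-hashed from a slice with per-element modular exponentiation) by a backtracking depth-first search over an explicit stack that extends the string bit by bit, resolves each query's slice once to an index window via slice.indices, evaluates window hashes with Horner's rule, and prunes an entire subtree as soon as a fully determined window hashes to zero; Pre_ excludes only the inputs where A raises (N < 0, or P = 0 with a nonempty query list).
import Mathlib
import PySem

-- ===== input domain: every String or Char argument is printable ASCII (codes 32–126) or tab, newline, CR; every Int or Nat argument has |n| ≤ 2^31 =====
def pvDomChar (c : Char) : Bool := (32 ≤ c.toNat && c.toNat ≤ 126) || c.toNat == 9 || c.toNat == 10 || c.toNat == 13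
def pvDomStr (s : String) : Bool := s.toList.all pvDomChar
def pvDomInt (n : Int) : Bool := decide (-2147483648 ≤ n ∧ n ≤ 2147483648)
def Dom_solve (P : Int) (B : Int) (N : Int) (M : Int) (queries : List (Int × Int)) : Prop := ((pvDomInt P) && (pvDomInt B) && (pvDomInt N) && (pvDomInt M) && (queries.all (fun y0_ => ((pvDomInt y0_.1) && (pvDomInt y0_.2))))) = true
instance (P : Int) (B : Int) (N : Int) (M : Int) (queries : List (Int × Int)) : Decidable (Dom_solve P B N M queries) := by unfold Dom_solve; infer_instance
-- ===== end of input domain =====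

-- B replaces A's flat enumeration of all 2^N bit strings (rebuilding the list and
-- re-hashing every query window with modular exponentiation for each candidate) by a
-- depth-first search that extends the string bit by bit and prunes a branch as soon as
-- a fully determined query window hashes to zero (Horner evaluation, windows resolved
-- once with slice.indices).

-- ===== PORT A =====
-- int((i >> j) & 1) : int() on an int is the identity; >>> is exact for j ≥ 0 (j ∈ range(N))
def pvBit (i j : Int) : Int := PySem.Int.band (i >>> j.toNat) 1

-- sum(x * pow(B, len(s)-j-1, P) for j, x in enumerate(s)) % P ; the exponent len(s)-j-1 is
-- ≥ 0 for every j produced by enumerate, so .toNat is exact; pow(b,e,m) is PySem.Int.powMod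
def pvHashA (P B : Int) (s : List Int) : Int :=
  PySem.Int.mod (((PySem.List.enumerate s 0).map
    (fun jx => jx.2 * PySem.Int.powMod B ((s.length : Int) - jx.1 - 1).toNat P)).sum) P

-- the inner for-with-break over queries: valid = all windows hash nonzero
def pvValidA (P B N : Int) (queries : List (Int × Int)) (i : Int) : Bool :=
  let A := (PySem.List.pyRange 0 N 1).map (fun j => pvBit i j)
  queries.all (fun q => !(pvHashA P B (PySem.List.slice A (some (q.1 - 1)) (some q.2)) == 0))

-- for i in range(1 << N): if valid: return "Yes" / fall through to "No" — ported as the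
-- evident recursion on the loop counter (1 << N iterations, exact for N ≥ 0, Pre_)
def pvLoopA (P B N : Int) (queries : List (Int × Int)) (i : Int) : Nat → String
  | 0 => "No"
  | fuel + 1 => if pvValidA P B N queries i then "Yes" else pvLoopA P B N queries (i + 1) fuel

def solve (P : Int) (B : Int) (N : Int) (M : Int) (queries : List (Int × Int)) : String :=
  pvLoopA P B N queries 0 ((1 : Nat) <<< N.toNat)

-- ===== PORT B =====
-- hand port of the stdlib call slice(x, _).indices(N) resolving an endpoint for step 1:
-- exact for 0 ≤ N (slice.indices raises ValueError for negative length, outside Pre_)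
def pvClamp (x n : Int) : Int := if x < 0 then max (x + n) 0 else min x n

-- spans = [slice(L-1, R).indices(N)[:2] for L, R in queries]
def pvSpans (N : Int) (queries : List (Int × Int)) : List (Int × Int) :=
  queries.map (fun q => (pvClamp (q.1 - 1) N, pvClamp q.2 N))

-- the inner Horner loop of fails; bits[j] via pyGetD (exact: every call site has 0 ≤ a ≤ j < b = len(bits))
def pvHval (P B : Int) (bits : List Int) (a b : Int) : Int :=
  (PySem.List.pyRange a b 1).foldl
    (fun h j => PySem.Int.mod (h * B + PySem.List.pyGetD bits j 0) P) 0

-- fails(bits): the for-with-early-return over spans is any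
def pvFails (P B : Int) (spans : List (Int × Int)) (bits : List Int) : Bool :=
  spans.any (fun ab => ab.2 == (bits.length : Int) && pvHval P B bits ab.1 ab.2 == 0)

-- the while-loop over the explicit stack; Python's stack top (end of the list) is the
-- head of the Lean list, so append(bits+[1]); append(bits+[0]) pushes bits+[0] on top;
-- the fuel argument only makes the loop structural (2^(N+1) iterations always suffice,
-- proved in pv_loop_eq below; the 0 case is unreachable from solve_alt's call)
def pvDfsLoop (P B : Int) (spans : List (Int × Int)) (N : Int)
    (stack : List (List Int)) (fuel : Nat) : Bool :=
  match fuel with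
  | 0 => false
  | fuel + 1 =>
    match stack with
    | [] => false
    | bits :: rest =>
      if pvFails P B spans bits then pvDfsLoop P B spans N rest fuel
      else if (bits.length : Int) == N then true
      else pvDfsLoop P B spans N ((bits ++ [0]) :: (bits ++ [1]) :: rest) fuel

def solve_alt (P : Int) (B : Int) (N : Int) (M : Int) (queries : List (Int × Int)) : String :=
  if pvDfsLoop P B (pvSpans N queries) N [[]] ((2:Nat) ^ (N.toNat + 1)) then "Yes" else "No"

-- ===== PRECONDITION & SPEC =====
-- Pre_ excludes exactly the crashes: N < 0 (A: ValueError from 1 << N; B: ValueError from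
-- slice.indices) and P = 0 with a nonempty query list (A: pow(B, e, 0) raises ValueError).
def Pre_solve (P : Int) (B : Int) (N : Int) (M : Int) (queries : List (Int × Int)) : Prop :=
  0 ≤ N ∧ (P ≠ 0 ∨ queries = [])
instance (P : Int) (B : Int) (N : Int) (M : Int) (queries : List (Int × Int)) : Decidable (Pre_solve P B N M queries) := by unfold Pre_solve; infer_instance

def pvWitness_solve : Int × Int × Int × Int × (List (Int × Int)) := (5, 2, 2, 1, [(1, 2)])

def Spec_solve (P : Int) (B : Int) (N : Int) (M : Int) (queries : List (Int × Int)) (out : String) : Prop := out = solve_alt P B N M queries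
instance (P : Int) (B : Int) (N : Int) (M : Int) (queries : List (Int × Int)) (out : String) : Decidable (Spec_solve P B N M queries out) := by unfold Spec_solve; infer_instance

-- ===== CLAIM (what is proved, stated in full; the proofs are below) =====
def Claim_equal_solve : Prop := ∀ (P : Int) (B : Int) (N : Int) (M : Int) (queries : List (Int × Int)), Dom_solve P B N M queries → Pre_solve P B N M queries → Spec_solve P B N M queries (solve P B N M queries)

-- ===== LEMMAS AND PROOFS =====

-- Pure (un-modded) Horner value of a word
def pvPoly (B : Int) (w : List Int) : Int := w.foldl (fun h x => h * B + x) 0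

-- A's bit list, in the form the bijection induction uses
def pvBitsN (i : Int) (n : Nat) : List Int := (List.range n).map (fun k : Nat => pvBit i (k : Int))

-- proof-side recursive tree form of B's stack search
def pvDfs (P B : Int) (spans : List (Int × Int)) (N : Int) (bits : List Int) (fuel : Nat) : Bool :=
  if pvFails P B spans bits then
    false
  else if (bits.length : Int) == N then
    true
  else match fuel with
    | 0 => false
    | fuel' + 1 =>
      pvDfs P B spans N (bits ++ [0]) fuel' || pvDfs P B spans N (bits ++ [1]) fuel'

-- fuel a stack needs so that pvDfsLoop fully processes it
def pvNeed (n : Nat) (stack : List (List Int)) : Nat :=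
  (stack.map (fun bits => 2 ^ (n - bits.length + 1) - 1)).sum

theorem pv_dvd_mod_sub (P z : Int) : P ∣ PySem.Int.mod z P - z := by
  have h := Int.fmod_add_mul_fdiv z P
  exact ⟨-(z.fdiv P), by simp only [PySem.Int.mod]; linarith⟩

theorem pv_fmod_congr (P a b : Int) (hP : P ≠ 0) (h : P ∣ a - b) :
    PySem.Int.mod a P = PySem.Int.mod b P := by
  have hd : P ∣ PySem.Int.mod a P - PySem.Int.mod b P := by
    have h1 := pv_dvd_mod_sub P a
    have h2 := pv_dvd_mod_sub P b
    have : PySem.Int.mod a P - PySem.Int.mod b P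
        = (PySem.Int.mod a P - a) - (PySem.Int.mod b P - b) + (a - b) := by ring
    rw [this]
    exact dvd_add (dvd_sub h1 h2) h
  rcases lt_or_gt_of_ne hP with hneg | hpos
  · have b1 := PySem.Int.mod_neg_bounds a hneg
    have b2 := PySem.Int.mod_neg_bounds b hneg
    have h0 : PySem.Int.mod a P - PySem.Int.mod b P = 0 := by
      refine Int.eq_zero_of_abs_lt_dvd ((neg_dvd).mpr hd) ?_
      rw [abs_lt]; omega
    omega
  · have b1 := PySem.Int.mod_nonneg a hpos
    have b2 := PySem.Int.mod_lt a hpos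
    have b3 := PySem.Int.mod_nonneg b hpos
    have b4 := PySem.Int.mod_lt b hpos
    have h0 : PySem.Int.mod a P - PySem.Int.mod b P = 0 := by
      refine Int.eq_zero_of_abs_lt_dvd hd ?_
      rw [abs_lt]; omega
    omega

theorem pv_horner_shift (B : Int) (w : List Int) (h0 : Int) :
    w.foldl (fun h x => h * B + x) h0 = h0 * B ^ w.length + pvPoly B w := by
  induction w generalizing h0 with
  | nil => simp [pvPoly]
  | cons x w ih =>
    have hp : pvPoly B (x :: w) = x * B ^ w.length + pvPoly B w := by
      show List.foldl _ _ (x :: w) = _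
      rw [List.foldl_cons, ih]; ring
    rw [List.foldl_cons, ih, hp, List.length_cons]; ring

theorem pv_foldmod_eq (P B : Int) (hP : P ≠ 0) (w : List Int) (hw : w ≠ []) (h0 : Int) :
    w.foldl (fun h x => PySem.Int.mod (h * B + x) P) h0
      = PySem.Int.mod (h0 * B ^ w.length + pvPoly B w) P := by
  induction w generalizing h0 with
  | nil => exact absurd rfl hw
  | cons x w ih =>
    have hp : pvPoly B (x :: w) = x * B ^ w.length + pvPoly B w := by
      show List.foldl _ _ (x :: w) = _
      rw [List.foldl_cons, pv_horner_shift]; ring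
    rw [List.foldl_cons]
    rcases List.eq_nil_or_concat w with hnil | _
    · subst hnil
      simp [pvPoly]
    · have hw' : w ≠ [] := by rintro rfl; simp at *
      rw [ih hw']
      have hcong : PySem.Int.mod (PySem.Int.mod (h0 * B + x) P * B ^ w.length + pvPoly B w) P
          = PySem.Int.mod ((h0 * B + x) * B ^ w.length + pvPoly B w) P := by
        apply pv_fmod_congr P _ _ hP
        have hd := pv_dvd_mod_sub P (h0 * B + x)
        have : PySem.Int.mod (h0 * B + x) P * B ^ w.length + pvPoly B w
            - ((h0 * B + x) * B ^ w.length + pvPoly B w)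
            = (PySem.Int.mod (h0 * B + x) P - (h0 * B + x)) * B ^ w.length := by ring
        rw [this]
        exact Dvd.dvd.mul_right hd _
      rw [hcong, hp, List.length_cons]
      congr 1; ring

theorem pv_dvd_sum_sub (P : Int) (l : List (Int × Int)) (f g : Int × Int → Int)
    (h : ∀ p ∈ l, P ∣ f p - g p) : P ∣ (l.map f).sum - (l.map g).sum := by
  induction l with
  | nil => simp
  | cons x l ih =>
    simp only [List.map_cons, List.sum_cons]
    have : f x + (l.map f).sum - (g x + (l.map g).sum)
        = (f x - g x) + ((l.map f).sum - (l.map g).sum) := by ring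
    rw [this]
    exact dvd_add (h x (by simp)) (ih (fun p hp => h p (by simp [hp])))

theorem pv_polyE_eq (B : Int) (w : List Int) (s e : Int) (he : e = s + w.length) :
    ((PySem.List.enumerate w s).map
      (fun jx => jx.2 * B ^ (e - jx.1 - 1).toNat)).sum
      = pvPoly B w := by
  induction w generalizing s with
  | nil => simp [pvPoly, PySem.List.enumerate_nil]
  | cons x w ih =>
    rw [PySem.List.enumerate_cons, List.map_cons, List.sum_cons]
    have h1 : (e - s - 1).toNat = w.length := by
      simp only [List.length_cons] at he; omega
    have h2 : e = (s + 1) + w.length := by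
      simp only [List.length_cons] at he; push_cast at he ⊢; omega
    rw [h1, ih (s + 1) h2]
    have hp : pvPoly B (x :: w) = x * B ^ w.length + pvPoly B w := by
      show List.foldl _ _ (x :: w) = _
      rw [List.foldl_cons, pv_horner_shift]; ring
    rw [hp]

theorem pv_hashA_eq (P B : Int) (hP : P ≠ 0) (w : List Int) :
    pvHashA P B w = PySem.Int.mod (pvPoly B w) P := by
  unfold pvHashA
  have step1 : PySem.Int.mod (((PySem.List.enumerate w 0).map
      (fun jx => jx.2 * PySem.Int.powMod B ((w.length : Int) - jx.1 - 1).toNat P)).sum) P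
      = PySem.Int.mod (((PySem.List.enumerate w 0).map
      (fun jx => jx.2 * B ^ ((w.length : Int) - jx.1 - 1).toNat)).sum) P := by
    apply pv_fmod_congr P _ _ hP
    apply pv_dvd_sum_sub
    intro p _
    have : p.2 * PySem.Int.powMod B ((w.length : Int) - p.1 - 1).toNat P
        - p.2 * B ^ ((w.length : Int) - p.1 - 1).toNat
        = p.2 * (PySem.Int.powMod B ((w.length : Int) - p.1 - 1).toNat P
            - B ^ ((w.length : Int) - p.1 - 1).toNat) := by ring
    rw [this]
    exact Dvd.dvd.mul_left (pv_dvd_mod_sub P _) _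
  rw [step1, pv_polyE_eq B w 0 ((w.length : Int)) (by simp)]

theorem pv_hval_eq_fold (P B : Int) (bits : List Int) (a b : Int)
    (ha : 0 ≤ a) (hab : a ≤ b) (hb : b ≤ (bits.length : Int)) :
    pvHval P B bits a b
      = ((bits.drop a.toNat).take (b.toNat - a.toNat)).foldl
          (fun h x => PySem.Int.mod (h * B + x) P) 0 := by
  unfold pvHval
  have hb0 : 0 ≤ b := le_trans ha hab
  have hlen : ((bits.take b.toNat).length : Int) = b := by
    simp only [List.length_take]; omega
  have step1 : (PySem.List.pyRange a b 1).foldl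
      (fun h j => PySem.Int.mod (h * B + PySem.List.pyGetD bits j 0) P) 0
      = (PySem.List.pyRange a b 1).foldl
      (fun h j => PySem.Int.mod (h * B + PySem.List.pyGetD (bits.take b.toNat) j 0) P) 0 := by
    apply PySem.List.foldl_congr_mem
    intro acc j hj
    rw [PySem.List.mem_pyRange_one] at hj
    have hj0 : 0 ≤ j := le_trans ha hj.1
    rw [PySem.List.pyGetD_eq_getElem bits 0 hj0 (by omega),
        PySem.List.pyGetD_eq_getElem (bits.take b.toNat) 0 hj0 (by omega),
        List.getElem_take]
  rw [step1]
  have step2 := PySem.List.foldl_pyRange_pyGetD' (bits.take b.toNat) 0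
    (fun h x => PySem.Int.mod (h * B + x) P) 0 ha
  rw [hlen] at step2
  rw [step2, List.drop_take]

-- the window may be empty (b ≤ a): both sides are then 0
theorem pv_hval_eq_hashA (P B : Int) (hP : P ≠ 0) (bits : List Int) (a b : Int)
    (ha : 0 ≤ a) (hb0 : 0 ≤ b) (hb : b ≤ (bits.length : Int)) :
    pvHval P B bits a b = pvHashA P B ((bits.drop a.toNat).take (b.toNat - a.toNat)) := by
  by_cases hab : a ≤ b
  · rw [pv_hval_eq_fold P B bits a b ha hab hb]
    rcases List.eq_nil_or_concat ((bits.drop a.toNat).take (b.toNat - a.toNat)) with hnil | hcons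
    · rw [hnil]
      simp [pvHashA, PySem.List.enumerate_nil, PySem.Int.mod, Int.zero_fmod]
    · have hne : (bits.drop a.toNat).take (b.toNat - a.toNat) ≠ [] := by
        obtain ⟨l, x, hx⟩ := hcons; rw [hx]; simp
      rw [pv_foldmod_eq P B hP _ hne 0, pv_hashA_eq P B hP]
      have : 0 * B ^ ((bits.drop a.toNat).take (b.toNat - a.toNat)).length
          + pvPoly B ((bits.drop a.toNat).take (b.toNat - a.toNat))
          = pvPoly B ((bits.drop a.toNat).take (b.toNat - a.toNat)) := by ring
      rw [this]
  · have hba : b ≤ a := by omega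
    have h1 : PySem.List.pyRange a b 1 = [] := PySem.List.pyRange_one_eq_nil hba
    have h2 : b.toNat - a.toNat = 0 := by omega
    rw [h2]
    simp [pvHval, h1, pvHashA, PySem.List.enumerate_nil, PySem.Int.mod, Int.zero_fmod]

theorem pv_spans_bounds (N : Int) (hN : 0 ≤ N) (queries : List (Int × Int)) :
    ∀ p ∈ pvSpans N queries, 0 ≤ p.1 ∧ p.1 ≤ N ∧ 0 ≤ p.2 ∧ p.2 ≤ N := by
  intro p hp
  unfold pvSpans at hp
  obtain ⟨q, _, rfl⟩ := List.mem_map.mp hp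
  have c1 : 0 ≤ pvClamp (q.1 - 1) N ∧ pvClamp (q.1 - 1) N ≤ N := by
    unfold pvClamp; split_ifs <;> omega
  have c2 : 0 ≤ pvClamp q.2 N ∧ pvClamp q.2 N ≤ N := by
    unfold pvClamp; split_ifs <;> omega
  exact ⟨c1.1, c1.2, c2.1, c2.2⟩

theorem pv_slice_eq (s : List Int) (L R N : Int) (hN : 0 ≤ N) (hlen : (s.length : Int) = N) :
    PySem.List.slice s (some (L - 1)) (some R)
      = (s.drop (pvClamp (L - 1) N).toNat).take ((pvClamp R N).toNat - (pvClamp (L - 1) N).toNat) := by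
  have h1 : PySem.List.clampIdx s.length (L - 1) = (pvClamp (L - 1) N).toNat := by
    simp only [PySem.List.clampIdx, pvClamp]
    split_ifs <;> omega
  have h2 : PySem.List.clampIdx s.length R - PySem.List.clampIdx s.length (L - 1)
      = (pvClamp R N).toNat - (pvClamp (L - 1) N).toNat := by
    simp only [PySem.List.clampIdx, pvClamp]
    split_ifs <;> omega
  show List.take (PySem.List.clampIdx s.length R - PySem.List.clampIdx s.length (L - 1))
      (List.drop (PySem.List.clampIdx s.length (L - 1)) s) = _
  rw [h2, h1]

theorem pv_bit_zero (i : Int) : pvBit i 0 = PySem.Int.mod i 2 := by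
  unfold pvBit
  rw [show ((0:Int)).toNat = 0 from rfl, Int.shiftRight_zero, PySem.Int.band_one]

theorem pv_shiftRight_one (i : Int) (h : 0 ≤ i) : i >>> (1:Nat) = i / 2 := by
  cases i with
  | ofNat m =>
    show ((m >>> 1 : Nat) : Int) = ((m : Nat) : Int) / 2
    rw [Nat.shiftRight_one]
    omega
  | negSucc m => simp at h

theorem pv_bitsN_succ (i : Int) (n : Nat) :
    pvBitsN i (n + 1) = pvBit i 0 :: pvBitsN (i >>> (1:Nat)) n := by
  unfold pvBitsN
  rw [List.range_succ_eq_map, List.map_cons, List.map_map]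
  have htail : ∀ k ∈ List.range n,
      ((fun k : Nat => pvBit i (k : Int)) ∘ Nat.succ) k
        = (fun k : Nat => pvBit (i >>> (1:Nat)) (k : Int)) k := by
    intro k _
    show pvBit i ((Nat.succ k : Nat) : Int) = pvBit (i >>> (1:Nat)) ((k : Nat) : Int)
    unfold pvBit
    have h1 : ((Nat.succ k : Nat) : Int).toNat = 1 + k := by omega
    have h2 : ((k : Nat) : Int).toNat = k := by omega
    rw [h1, h2, Int.shiftRight_add]
  rw [List.map_congr_left htail]
  have hhead : pvBit i (((0:Nat) : Int)) = pvBit i 0 := by norm_num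
  rw [hhead]

theorem pv_bitsA_eq (i N : Int) (hN : 0 ≤ N) :
    (PySem.List.pyRange 0 N 1).map (fun j => pvBit i j) = pvBitsN i N.toNat := by
  rw [PySem.List.pyRange_one, List.map_map]
  unfold pvBitsN
  rw [show ((N : Int) - 0).toNat = N.toNat by omega]
  apply List.map_congr_left
  intro k _
  simp [Function.comp]

theorem pv_bits_exist (n : Nat) (p : List Int → Prop) :
    (∃ i : Int, 0 ≤ i ∧ i < 2 ^ n ∧ p (pvBitsN i n)) ↔
      (∃ t : List Int, t.length = n ∧ (∀ x ∈ t, x = 0 ∨ x = 1) ∧ p t) := by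
  induction n generalizing p with
  | zero =>
    constructor
    · rintro ⟨i, _, _, hp⟩
      exact ⟨[], rfl, by simp, by simpa [pvBitsN] using hp⟩
    · rintro ⟨t, ht, _, hp⟩
      rw [List.length_eq_zero_iff] at ht
      subst ht
      exact ⟨0, le_refl 0, by norm_num, by simpa [pvBitsN] using hp⟩
  | succ n ih =>
    constructor
    · rintro ⟨i, hi0, hi2, hp⟩
      rw [pv_bitsN_succ] at hp
      have hx := PySem.Int.mod_two_eq i
      have hbit : pvBit i 0 = PySem.Int.mod i 2 := pv_bit_zero i
      have hdiv : i >>> (1:Nat) = i / 2 := pv_shiftRight_one i hi0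
      have hb1 : 0 ≤ i / 2 := by omega
      have hb2 : i / 2 < 2 ^ n := by
        have hpow : (2:Int) ^ (n+1) = 2 * 2 ^ n := by ring
        omega
      have h1 : ∃ i' : Int, 0 ≤ i' ∧ i' < 2 ^ n ∧ p (pvBit i 0 :: pvBitsN i' n) :=
        ⟨i / 2, hb1, hb2, by rw [← hdiv]; exact hp⟩
      obtain ⟨t, ht, hbt, hpt⟩ := (ih (fun t => p (pvBit i 0 :: t))).mp h1
      refine ⟨pvBit i 0 :: t, by simp [ht], ?_, hpt⟩
      intro x hx'
      rcases List.mem_cons.mp hx' with rfl | h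
      · rw [hbit]; exact hx
      · exact hbt x h
    · rintro ⟨t, ht, hbt, hp⟩
      rcases t with _ | ⟨x, t'⟩
      · simp at ht
      have hx : x = 0 ∨ x = 1 := hbt x (by simp)
      have ht' : t'.length = n := by simpa using ht
      obtain ⟨i', hi0, hi2, hp'⟩ := (ih (fun t => p (x :: t))).mpr
        ⟨t', ht', fun y hy => hbt y (by simp [hy]), hp⟩
      refine ⟨2 * i' + x, by omega, ?_, ?_⟩
      · have hpow : (2:Int) ^ (n+1) = 2 * 2 ^ n := by ring
        omega
      · rw [pv_bitsN_succ]
        have e1 : pvBit (2 * i' + x) 0 = x := by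
          rw [pv_bit_zero, PySem.Int.mod_eq_emod_of_pos (by norm_num : (0:Int) < 2)]
          omega
        have e2 : (2 * i' + x) >>> (1:Nat) = i' := by
          rw [pv_shiftRight_one _ (by omega)]
          omega
        rw [e1, e2]
        exact hp'

theorem pv_validA_iff (P B N : Int) (hN : 0 ≤ N) (queries : List (Int × Int))
    (hP : P ≠ 0 ∨ queries = []) (i : Int) :
    pvValidA P B N queries i = true ↔
      (∀ p ∈ pvSpans N queries, pvHval P B (pvBitsN i N.toNat) p.1 p.2 ≠ 0) := by
  have hA : ((PySem.List.pyRange 0 N 1).map (fun j => pvBit i j)) = pvBitsN i N.toNat :=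
    pv_bitsA_eq i N hN
  have hlen : ((pvBitsN i N.toNat).length : Int) = N := by
    unfold pvBitsN
    rw [List.length_map, List.length_range]; omega
  have core : ∀ q ∈ queries,
      (pvHashA P B (PySem.List.slice (pvBitsN i N.toNat) (some (q.1 - 1)) (some q.2)) ≠ 0)
      ↔ (pvHval P B (pvBitsN i N.toNat) (pvClamp (q.1 - 1) N) (pvClamp q.2 N) ≠ 0) := by
    intro q hq
    have hP0 : P ≠ 0 := by
      rcases hP with h | h
      · exact h
      · subst h; simp at hq
    have c1 : 0 ≤ pvClamp (q.1 - 1) N ∧ pvClamp (q.1 - 1) N ≤ N := by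
      unfold pvClamp; split_ifs <;> omega
    have c2 : 0 ≤ pvClamp q.2 N ∧ pvClamp q.2 N ≤ N := by
      unfold pvClamp; split_ifs <;> omega
    rw [pv_slice_eq (pvBitsN i N.toNat) q.1 q.2 N hN hlen]
    rw [pv_hval_eq_hashA P B hP0 (pvBitsN i N.toNat) _ _ c1.1 c2.1 (by rw [hlen]; exact c2.2)]
  unfold pvValidA
  rw [hA, List.all_eq_true]
  constructor
  · intro h p hp
    unfold pvSpans at hp
    obtain ⟨q, hq, rfl⟩ := List.mem_map.mp hp
    have h1 := h q hq
    simp only [Bool.not_eq_eq_eq_not, Bool.not_true, beq_eq_false_iff_ne] at h1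
    exact (core q hq).mp h1
  · intro h q hq
    have hp : (pvClamp (q.1 - 1) N, pvClamp q.2 N) ∈ pvSpans N queries := by
      unfold pvSpans
      exact List.mem_map.mpr ⟨q, hq, rfl⟩
    have h1 := h _ hp
    have h2 := (core q hq).mpr h1
    simp only [Bool.not_eq_eq_eq_not, Bool.not_true, beq_eq_false_iff_ne]
    exact h2

theorem pv_hval_prefix (P B : Int) (bits t : List Int) (a b : Int)
    (ha : 0 ≤ a) (hb : b ≤ (bits.length : Int)) :
    pvHval P B (bits ++ t) a b = pvHval P B bits a b := by
  unfold pvHval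
  apply PySem.List.foldl_congr_mem
  intro acc j hj
  rw [PySem.List.mem_pyRange_one] at hj
  have hj0 : 0 ≤ j := le_trans ha hj.1
  rw [PySem.List.pyGetD_eq_getElem (bits ++ t) 0 hj0 (by simp only [List.length_append]; push_cast; omega),
      PySem.List.pyGetD_eq_getElem bits 0 hj0 (by omega),
      List.getElem_append_left (by omega)]

theorem pvDfs_zero (P B : Int) (spans : List (Int × Int)) (N : Int) (bits : List Int) :
    pvDfs P B spans N bits 0
      = (if pvFails P B spans bits
          then false else if (bits.length : Int) == N then true else false) := by
  rfl

theorem pvDfs_succ (P B : Int) (spans : List (Int × Int)) (N : Int) (bits : List Int) (fuel : Nat) :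
    pvDfs P B spans N bits (fuel + 1)
      = (if pvFails P B spans bits
          then false else if (bits.length : Int) == N then true
          else (pvDfs P B spans N (bits ++ [0]) fuel || pvDfs P B spans N (bits ++ [1]) fuel)) := by
  rfl

theorem pv_dfs_iff (P B N : Int) (hN : 0 ≤ N) (spans : List (Int × Int))
    (hsp : ∀ p ∈ spans, 0 ≤ p.1 ∧ p.1 ≤ N ∧ 0 ≤ p.2 ∧ p.2 ≤ N) :
    ∀ (fuel : Nat) (bits : List Int), (bits.length : Int) + fuel = N →
      (pvDfs P B spans N bits fuel = true ↔
        ∃ t : List Int, t.length = fuel ∧ (∀ x ∈ t, x = 0 ∨ x = 1) ∧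
          ∀ p ∈ spans, (bits.length : Int) ≤ p.2 → pvHval P B (bits ++ t) p.1 p.2 ≠ 0) := by
  intro fuel
  induction fuel with
  | zero =>
    intro bits hlen
    have hlenN : (bits.length : Int) = N := by push_cast at hlen; omega
    rw [pvDfs_zero]
    by_cases hchk : pvFails P B spans bits = true
    · rw [if_pos hchk]
      simp only [Bool.false_eq_true, false_iff]
      rintro ⟨t, ht, -, hgood⟩
      rw [List.length_eq_zero_iff] at ht
      subst ht
      unfold pvFails at hchk
      rw [List.any_eq_true] at hchk
      obtain ⟨ab, hab, hcond⟩ := hchk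
      simp only [Bool.and_eq_true, beq_iff_eq] at hcond
      have h1 := hgood ab hab (le_of_eq hcond.1.symm)
      rw [List.append_nil] at h1
      exact h1 hcond.2
    · rw [if_neg hchk, if_pos (by simpa using hlenN)]
      simp only [true_iff]
      refine ⟨[], rfl, by simp, ?_⟩
      intro p hp hple
      have hub := (hsp p hp).2.2.2
      have hpeq : p.2 = (bits.length : Int) := by omega
      intro h0
      apply hchk
      unfold pvFails
      rw [List.any_eq_true]
      refine ⟨p, hp, ?_⟩
      rw [List.append_nil] at h0
      rw [hpeq] at h0
      simp [hpeq, h0]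
  | succ fuel ih =>
    intro bits hlen
    have hne : ((bits.length : Int) == N) = false := by
      simp only [beq_eq_false_iff_ne, ne_eq]
      push_cast at hlen; omega
    rw [pvDfs_succ, hne]
    by_cases hchk : pvFails P B spans bits = true
    · rw [if_pos hchk]
      simp only [Bool.false_eq_true, false_iff]
      rintro ⟨t, ht, hbt, hgood⟩
      unfold pvFails at hchk
      rw [List.any_eq_true] at hchk
      obtain ⟨ab, hab, hcond⟩ := hchk
      simp only [Bool.and_eq_true, beq_iff_eq] at hcond
      have h1 := hgood ab hab (le_of_eq hcond.1.symm)
      rw [pv_hval_prefix P B bits t ab.1 ab.2 (hsp ab hab).1 (le_of_eq hcond.1)] at h1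
      exact h1 hcond.2
    · rw [if_neg hchk]
      simp only [Bool.false_eq_true, if_false, Bool.or_eq_true]
      have hlen' : (bits.length : Int) + (fuel : Int) + 1 = N := by
        push_cast at hlen; omega
      have hl0 : (((bits ++ [(0:Int)]).length : Int)) + (fuel : Int) = N := by
        have hla : (bits ++ [(0:Int)]).length = bits.length + 1 := by simp
        rw [hla]; push_cast; omega
      have hl1 : (((bits ++ [(1:Int)]).length : Int)) + (fuel : Int) = N := by
        have hla : (bits ++ [(1:Int)]).length = bits.length + 1 := by simp
        rw [hla]; push_cast; omega
      have ih0 := ih (bits ++ [(0:Int)]) hl0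
      have ih1 := ih (bits ++ [(1:Int)]) hl1
      rw [ih0, ih1]
      have main : ∀ x : Int, x = 0 ∨ x = 1 →
          (∃ t, t.length = fuel ∧ (∀ y ∈ t, y = 0 ∨ y = 1) ∧
            ∀ p ∈ spans, ((bits ++ [x]).length : Int) ≤ p.2 →
              pvHval P B ((bits ++ [x]) ++ t) p.1 p.2 ≠ 0) →
          (∃ t, t.length = fuel + 1 ∧ (∀ y ∈ t, y = 0 ∨ y = 1) ∧
            ∀ p ∈ spans, (bits.length : Int) ≤ p.2 → pvHval P B (bits ++ t) p.1 p.2 ≠ 0) := by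
        rintro x hx ⟨t, ht, hbt, hgood⟩
        refine ⟨x :: t, by simp [ht], ?_, ?_⟩
        · intro y hy
          rcases List.mem_cons.mp hy with rfl | hy'
          · exact hx
          · exact hbt y hy'
        · intro p hp hple
          by_cases hcase : p.2 = (bits.length : Int)
          · rw [pv_hval_prefix P B bits (x :: t) p.1 p.2 (hsp p hp).1 (le_of_eq hcase)]
            intro h0
            apply hchk
            unfold pvFails
            rw [List.any_eq_true]
            rw [hcase] at h0
            exact ⟨p, hp, by simp [hcase, h0]⟩
          · have hple' : ((bits ++ [x]).length : Int) ≤ p.2 := by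
              have hla : (bits ++ [x]).length = bits.length + 1 := by simp
              rw [hla]; push_cast; omega
            have h1 := hgood p hp hple'
            rw [show (bits ++ [x]) ++ t = bits ++ x :: t by simp] at h1
            exact h1
      constructor
      · rintro (h | h)
        · exact main 0 (Or.inl rfl) h
        · exact main 1 (Or.inr rfl) h
      · rintro ⟨t, ht, hbt, hgood⟩
        rcases t with _ | ⟨x, t'⟩
        · simp at ht
        have hx : x = 0 ∨ x = 1 := hbt x (by simp)
        have hgood' : ∀ p ∈ spans, ((bits ++ [x]).length : Int) ≤ p.2 →
            pvHval P B ((bits ++ [x]) ++ t') p.1 p.2 ≠ 0 := by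
          intro p hp hple
          have hple2 : (bits.length : Int) ≤ p.2 := by
            have hla : (bits ++ [x]).length = bits.length + 1 := by simp
            rw [hla] at hple; push_cast at hple; omega
          have h1 := hgood p hp hple2
          rw [show (bits ++ [x]) ++ t' = bits ++ x :: t' by simp]
          exact h1
        have hex : ∃ t, t.length = fuel ∧ (∀ y ∈ t, y = 0 ∨ y = 1) ∧
            ∀ p ∈ spans, ((bits ++ [x]).length : Int) ≤ p.2 →
              pvHval P B ((bits ++ [x]) ++ t) p.1 p.2 ≠ 0 :=
          ⟨t', by simpa using ht, fun y hy => hbt y (by simp [hy]), hgood'⟩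
        rcases hx with rfl | rfl
        · exact Or.inl hex
        · exact Or.inr hex

theorem pvDfsLoop_succ_cons (P B : Int) (spans : List (Int × Int)) (N : Int)
    (bits : List Int) (rest : List (List Int)) (fuel : Nat) :
    pvDfsLoop P B spans N (bits :: rest) (fuel + 1)
      = (if pvFails P B spans bits then pvDfsLoop P B spans N rest fuel
         else if (bits.length : Int) == N then true
         else pvDfsLoop P B spans N ((bits ++ [0]) :: (bits ++ [1]) :: rest) fuel) := by
  rfl

theorem pvNeed_cons (n : Nat) (b : List Int) (r : List (List Int)) :
    pvNeed n (b :: r) = (2 ^ (n - b.length + 1) - 1) + pvNeed n r := by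
  simp [pvNeed]

theorem pv_loop_eq (P B N : Int) (hN : 0 ≤ N) (spans : List (Int × Int)) :
    ∀ (fuel : Nat) (stack : List (List Int)),
      (∀ bits ∈ stack, bits.length ≤ N.toNat) →
      pvNeed N.toNat stack ≤ fuel →
      pvDfsLoop P B spans N stack fuel
        = stack.any (fun bits => pvDfs P B spans N bits (N.toNat - bits.length)) := by
  intro fuel
  induction fuel with
  | zero =>
    intro stack hlen hneed
    cases stack with
    | nil => simp [pvDfsLoop]
    | cons bits rest =>
      exfalso
      rw [pvNeed_cons] at hneed
      have h1 : 1 ≤ 2 ^ (N.toNat - bits.length) := Nat.one_le_two_pow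
      have hp : 2 ^ (N.toNat - bits.length + 1) = 2 ^ (N.toNat - bits.length) * 2 := pow_succ 2 _
      omega
  | succ fuel ih =>
    intro stack hlen hneed
    cases stack with
    | nil => simp [pvDfsLoop]
    | cons bits rest =>
      rw [pvNeed_cons] at hneed
      have h1 : 1 ≤ 2 ^ (N.toNat - bits.length) := Nat.one_le_two_pow
      have hp : 2 ^ (N.toNat - bits.length + 1) = 2 ^ (N.toNat - bits.length) * 2 := pow_succ 2 _
      rw [pvDfsLoop_succ_cons]
      by_cases hf : pvFails P B spans bits = true
      · rw [if_pos hf]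
        have hdfs : pvDfs P B spans N bits (N.toNat - bits.length) = false := by
          cases hmc : N.toNat - bits.length with
          | zero => rw [pvDfs_zero, if_pos hf]
          | succ k => rw [pvDfs_succ, if_pos hf]
        rw [ih rest (fun b hb => hlen b (List.mem_cons_of_mem _ hb)) (by omega)]
        rw [List.any_cons, hdfs]
        simp
      · rw [if_neg hf]
        by_cases hNb : ((bits.length : Int) == N) = true
        · rw [if_pos hNb]
          have hm0 : N.toNat - bits.length = 0 := by
            rw [beq_iff_eq] at hNb
            omega
          have hdfs : pvDfs P B spans N bits (N.toNat - bits.length) = true := by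
            rw [hm0, pvDfs_zero, if_neg hf, if_pos hNb]
          rw [List.any_cons, hdfs]
          simp
        · rw [if_neg hNb]
          have hlb := hlen bits (List.mem_cons_self ..)
          have hne : (bits.length : Int) ≠ N := by
            intro he
            exact hNb (by rw [beq_iff_eq]; exact he)
          have hlt : bits.length < N.toNat := by omega
          have hm1 : N.toNat - bits.length = (N.toNat - (bits.length + 1)) + 1 := by omega
          have hlen' : ∀ b ∈ (bits ++ [(0:Int)]) :: (bits ++ [(1:Int)]) :: rest,
              b.length ≤ N.toNat := by
            intro b hb
            rcases List.mem_cons.mp hb with rfl | hb2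
            · simp only [List.length_append, List.length_cons, List.length_nil]; omega
            rcases List.mem_cons.mp hb2 with rfl | hb3
            · simp only [List.length_append, List.length_cons, List.length_nil]; omega
            · exact hlen b (List.mem_cons_of_mem _ hb3)
          have e0 : (bits ++ [(0:Int)]).length = bits.length + 1 := by simp
          have e1 : (bits ++ [(1:Int)]).length = bits.length + 1 := by simp
          have hneed' : pvNeed N.toNat ((bits ++ [(0:Int)]) :: (bits ++ [(1:Int)]) :: rest)
              ≤ fuel := by
            rw [pvNeed_cons, pvNeed_cons, e0, e1]
            have hp2 : 2 ^ (N.toNat - bits.length)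
                = 2 ^ (N.toNat - (bits.length + 1)) * 2 := by
              rw [show N.toNat - bits.length = (N.toNat - (bits.length + 1)) + 1 from hm1,
                pow_succ]
            omega
          rw [ih _ hlen' hneed']
          have hdfs : pvDfs P B spans N bits (N.toNat - bits.length)
              = (pvDfs P B spans N (bits ++ [0]) (N.toNat - (bits.length + 1))
                 || pvDfs P B spans N (bits ++ [1]) (N.toNat - (bits.length + 1))) := by
            rw [hm1, pvDfs_succ, if_neg hf, if_neg hNb]
          have f0 : N.toNat - (bits ++ [(0:Int)]).length = N.toNat - (bits.length + 1) := by
            rw [e0]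
          have f1 : N.toNat - (bits ++ [(1:Int)]).length = N.toNat - (bits.length + 1) := by
            rw [e1]
          rw [List.any_cons, List.any_cons, List.any_cons, hdfs, f0, f1, Bool.or_assoc]

theorem pvLoopA_eq (P B N : Int) (queries : List (Int × Int)) :
    ∀ (fuel : Nat) (i : Int),
      pvLoopA P B N queries i fuel
        = (if (List.range fuel).any (fun k => pvValidA P B N queries (i + k)) then "Yes" else "No") := by
  intro fuel
  induction fuel with
  | zero => intro i; simp [pvLoopA]
  | succ fuel ih =>
    intro i
    rw [pvLoopA, List.range_succ_eq_map]
    have hmap : (List.map Nat.succ (List.range fuel)).any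
          (fun k => pvValidA P B N queries (i + k))
        = (List.range fuel).any (fun k => pvValidA P B N queries (i + 1 + k)) := by
      rw [List.any_map]
      congr 1
      funext k
      show pvValidA P B N queries (i + ((Nat.succ k : Nat) : Int))
          = pvValidA P B N queries (i + 1 + (k : Int))
      congr 1
      push_cast; ring
    by_cases hv : pvValidA P B N queries i = true
    · have h0 : pvValidA P B N queries (i + ((0:Nat):Int)) = true := by simpa using hv
      rw [if_pos hv, List.any_cons, hmap, h0]
      simp
    · have h0 : pvValidA P B N queries (i + ((0:Nat):Int)) = false := by
        simpa using (Bool.not_eq_true _).mp hv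
      rw [if_neg hv, ih, List.any_cons, hmap, h0]
      simp

-- ===== VERDICT (by name: the statement is the Claim_ definition above) =====
theorem solve_spec : Claim_equal_solve := by
  unfold Claim_equal_solve
  intro P B N M queries _ hPre
  obtain ⟨hN, hP⟩ := hPre
  unfold Spec_solve solve solve_alt
  have hsp := pv_spans_bounds N hN queries
  have hpow : (((2:Nat) ^ N.toNat : Nat) : Int) = (2:Int) ^ N.toNat := by push_cast; ring
  have key : ((List.range ((2:Nat) ^ N.toNat)).any
        (fun k => pvValidA P B N queries ((0:Int) + k)) = true)
      ↔ (pvDfs P B (pvSpans N queries) N [] N.toNat = true) := by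
    rw [List.any_eq_true]
    rw [pv_dfs_iff P B N hN (pvSpans N queries) hsp N.toNat []
      (by simp only [List.length_nil, Nat.cast_zero, zero_add]; omega)]
    constructor
    · rintro ⟨k, hk, hv⟩
      rw [List.mem_range] at hk
      rw [pv_validA_iff P B N hN queries hP] at hv
      have hex : ∃ j : Int, 0 ≤ j ∧ j < 2 ^ N.toNat ∧
          (∀ p ∈ pvSpans N queries, pvHval P B (pvBitsN j N.toNat) p.1 p.2 ≠ 0) := by
        refine ⟨(0:Int) + k, by positivity, ?_, hv⟩
        rw [← hpow]
        push_cast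
        omega
      obtain ⟨t, ht, hbt, hgood⟩ :=
        (pv_bits_exist N.toNat (fun t => ∀ p ∈ pvSpans N queries, pvHval P B t p.1 p.2 ≠ 0)).mp hex
      refine ⟨t, ht, hbt, ?_⟩
      intro p hp _
      rw [List.nil_append]
      exact hgood p hp
    · rintro ⟨t, ht, hbt, hgood⟩
      have hgood' : ∀ p ∈ pvSpans N queries, pvHval P B t p.1 p.2 ≠ 0 := by
        intro p hp
        have h0 : ((List.length ([] : List Int) : Int)) ≤ p.2 := by
          simp only [List.length_nil, Nat.cast_zero]
          exact (hsp p hp).2.2.1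
        have := hgood p hp h0
        rwa [List.nil_append] at this
      obtain ⟨i, hi0, hi2, hv⟩ :=
        (pv_bits_exist N.toNat (fun t => ∀ p ∈ pvSpans N queries, pvHval P B t p.1 p.2 ≠ 0)).mpr
          ⟨t, ht, hbt, hgood'⟩
      refine ⟨i.toNat, ?_, ?_⟩
      · rw [List.mem_range]
        rw [← hpow] at hi2
        omega
      · rw [pv_validA_iff P B N hN queries hP]
        have hcast : (0:Int) + (i.toNat : Int) = i := by omega
        rw [hcast]
        exact hv
  have hshift : ((1 : Nat) <<< N.toNat) = (2:Nat) ^ N.toNat := by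
    rw [Nat.shiftLeft_eq, one_mul]
  have hone : ∀ b ∈ [([] : List Int)], b.length ≤ N.toNat := by
    intro b hb
    simp at hb
    subst hb
    simp
  have hneed0 : pvNeed N.toNat [[]] ≤ (2:Nat) ^ (N.toNat + 1) := by
    simp [pvNeed]
  have hloop : pvDfsLoop P B (pvSpans N queries) N [[]] ((2:Nat) ^ (N.toNat + 1))
      = pvDfs P B (pvSpans N queries) N [] N.toNat := by
    rw [pv_loop_eq P B N hN (pvSpans N queries) _ [[]] hone hneed0]
    simp
  rw [pvLoopA_eq, hshift]
  by_cases hd : pvDfs P B (pvSpans N queries) N [] N.toNat = true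
  · rw [if_pos (key.mpr hd), if_pos (by rw [hloop]; exact hd)]
  · rw [if_neg (fun h => hd (key.mp h)), if_neg (fun h => hd (by rw [← hloop]; exact h))]
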